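-- pv_equiv track=rewrite | github.com/ErosSph/CARTCOV | static_coi_extractor.py | choose_a1
-- ===== SOURCE A (Python) =====
-- def choose_a1(state_vars, dist, depth=None, max_state=None):
--     candidates = sorted((dist[v], v) for v in state_vars if v in dist)
--     if not candidates:
--         return set(), set(), None
--
--     if depth is None:
--         if max_state is None:
--             depth = candidates[0][0]
--         else:
--             running = 0
--             depth = candidates[0][0]
--             for d, _ in candidates:
--                 if d > depth:
--                     if running >= max_state:
--                         break
--                     depth = d
--                 running += 1
--             if running < max_state:
--                 depth = candidates[-1][0]
--     else:
--         candidate_depths = sorted({d for d, _ in candidates})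
--         if depth not in candidate_depths:
--             higher = [d for d in candidate_depths if d > depth]
--             if higher:
--                 depth = higher[0]
--             else:
--                 depth = candidate_depths[-1]
--
--     a1 = {v for v in state_vars if dist.get(v) == depth}
--     kept = {node for node, d in dist.items() if d <= depth}
--     return a1, kept, depth
-- ===== SOURCE B (Python) =====
-- def choose_a1(state_vars, dist, depth=None, max_state=None):
--     # Order-statistic selection: sort only the depth values and pick the
--     # threshold as vals[max_state-1] (closed form) instead of A's
--     # advance-and-break scan over sorted (depth, var) pairs.
--     vals = sorted(dist[v] for v in state_vars if v in dist)
--     if not vals: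
--         return set(), set(), None
--
--     if depth is None:
--         if max_state is None or max_state <= 0:
--             depth = vals[0]
--         elif max_state > len(vals):
--             depth = vals[-1]
--         else:
--             depth = vals[max_state - 1]
--     elif depth not in vals:
--         higher = next((d for d in vals if d > depth), None)
--         depth = higher if higher is not None else vals[-1]
--
--     a1 = {v for v in state_vars if dist.get(v) == depth}
--     kept = {node for node, d in dist.items() if d <= depth}
--     return a1, kept, depth
-- ===== Notes on version B (the rewrite author's own statement) =====
-- stated objective: alternative
-- what changed: B replaces A's sort of (depth, var) pairs plus an interleaved advance-and-break scan with post-loop fallback by sorting only the depth values and selecting the threshold in closed form as the order statistic vals[max_state-1] (clamped to first/last), and replaces the sorted-distinct-depths list of the explicit-depth branch by direct min-above/max selection on the sorted values.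
import Mathlib
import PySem

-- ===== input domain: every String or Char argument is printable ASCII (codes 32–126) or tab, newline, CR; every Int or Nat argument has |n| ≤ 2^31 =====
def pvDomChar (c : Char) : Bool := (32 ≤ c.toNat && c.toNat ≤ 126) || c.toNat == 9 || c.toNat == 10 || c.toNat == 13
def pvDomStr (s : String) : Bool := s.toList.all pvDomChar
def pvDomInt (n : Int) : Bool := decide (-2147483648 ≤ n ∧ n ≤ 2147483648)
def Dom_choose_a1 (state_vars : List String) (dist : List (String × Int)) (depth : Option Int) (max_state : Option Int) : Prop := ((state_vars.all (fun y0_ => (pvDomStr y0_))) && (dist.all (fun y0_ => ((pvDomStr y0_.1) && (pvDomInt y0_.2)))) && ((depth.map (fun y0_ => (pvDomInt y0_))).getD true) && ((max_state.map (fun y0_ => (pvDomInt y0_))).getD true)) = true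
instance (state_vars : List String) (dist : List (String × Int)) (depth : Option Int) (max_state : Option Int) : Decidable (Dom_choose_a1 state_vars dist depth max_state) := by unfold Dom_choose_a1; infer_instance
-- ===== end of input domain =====

-- B sorts only the depth values and picks the threshold as the order statistic
-- vals[max_state-1] in closed form instead of A's advance-and-break scan over
-- sorted (depth, var) pairs (objective: alternative algorithm, same exact results).

-- ===== PORT A =====
-- the body of A's 'for d, _ in candidates' loop (state: running, depth, broken-flag)
def stepA (ms : Int) (st : Int × Int × Bool) (p : Int × String) : Int × Int × Bool :=
  match st with
  | (running, dep, done) =>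
    if done then (running, dep, done)
    else if p.1 > dep then
      (if running ≥ ms then (running, dep, true) else (running + 1, p.1, false))
    else (running + 1, dep, false)

-- A's depth selection, given candidates = c0 :: rest (Python: the 'if depth is None: … else: …' block)
def aDep (c0 : Int × String) (rest : List (Int × String)) (depth : Option Int) (max_state : Option Int) : Int :=
  match depth with
  | none =>
    match max_state with
    | none => c0.1
    | some ms =>
      let s := (c0 :: rest).foldl (stepA ms) (0, c0.1, false)
      if s.1 < ms then ((c0 :: rest).getLastD c0).1 else s.2.1
  | some dep0 =>
    let candidate_depths := PySem.List.sorted (PySem.Set.ofList ((c0 :: rest).map (fun p => p.1))) (fun x => x) false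
    if dep0 ∈ candidate_depths then dep0
    else
      match candidate_depths.filter (fun dd => dd > dep0) with
      | h :: _ => h
      | [] => candidate_depths.getLastD 0

def choose_a1 (state_vars : List String) (dist : List (String × Int)) (depth : Option Int) (max_state : Option Int) : List String × List String × Option Int :=
  let d := PySem.Dict.mk dist
  let candidates := PySem.List.sorted2 (state_vars.filterMap (fun v => (d.get? v).map (fun dv => (dv, v)))) (fun p => p.1) (fun p => p.2) false
  match candidates with
  | [] => ([], [], none)
  | c0 :: rest =>
    let dep : Int := aDep c0 rest depth max_state
    let a1 := PySem.Set.ofList (state_vars.filter (fun v => d.get? v == some dep))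
    let kept := PySem.Set.ofList ((d.items.filter (fun p => p.2 ≤ dep)).map (fun p => p.1))
    (a1, kept, some dep)

-- ===== PORT B =====
-- B's depth selection, given vals = v0 :: vrest (Python: the 'if depth is None: … elif …' chain)
def bDep (v0 : Int) (vrest : List Int) (depth : Option Int) (max_state : Option Int) : Int :=
  match depth with
  | none =>
    match max_state with
    | none => v0                                   -- 'max_state is None' arm of the merged test
    | some ms =>
      if ms ≤ 0 then v0
      else if ((v0 :: vrest).length : Int) < ms then (v0 :: vrest).getLastD 0
      else (PySem.List.pyGet? (v0 :: vrest) (ms - 1)).getD 0   -- in range under the two guards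
  | some dep0 =>
    if dep0 ∈ (v0 :: vrest) then dep0
    else
      -- next((d for d in vals if d > depth), None), else vals[-1]
      match (v0 :: vrest).filter (fun dd => dd > dep0) with
      | h :: _ => h
      | [] => (v0 :: vrest).getLastD 0

def choose_a1_alt (state_vars : List String) (dist : List (String × Int)) (depth : Option Int) (max_state : Option Int) : List String × List String × Option Int :=
  let d := PySem.Dict.mk dist
  let vals := PySem.List.sorted (state_vars.filterMap (fun v => d.get? v)) (fun x => x) false
  match vals with
  | [] => ([], [], none)
  | v0 :: vrest =>
    let dep : Int := bDep v0 vrest depth max_state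
    let a1 := PySem.Set.ofList (state_vars.filter (fun v => d.get? v == some dep))
    let kept := PySem.Set.ofList ((d.items.filter (fun p => p.2 ≤ dep)).map (fun p => p.1))
    (a1, kept, some dep)

-- ===== PRECONDITION & SPEC =====
def Spec_choose_a1 (state_vars : List String) (dist : List (String × Int)) (depth : Option Int) (max_state : Option Int) (out : List String × List String × Option Int) : Prop := out = choose_a1_alt state_vars dist depth max_state
instance (state_vars : List String) (dist : List (String × Int)) (depth : Option Int) (max_state : Option Int) (out : List String × List String × Option Int) : Decidable (Spec_choose_a1 state_vars dist depth max_state out) := by unfold Spec_choose_a1; infer_instance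

-- ===== CLAIM (what is proved, stated in full; the proofs are below) =====
def Claim_equal_choose_a1 : Prop := ∀ (state_vars : List String) (dist : List (String × Int)) (depth : Option Int) (max_state : Option Int), Dom_choose_a1 state_vars dist depth max_state → Spec_choose_a1 state_vars dist depth max_state (choose_a1 state_vars dist depth max_state)

-- ===== LEMMAS AND PROOFS =====

-- A's loop body on the depth component only (stepA ignores the variable name)
def stepA' (ms : Int) (st : Int × Int × Bool) (dd : Int) : Int × Int × Bool :=
  match st with
  | (running, dep, done) =>
    if done then (running, dep, done)
    else if dd > dep then
      (if running ≥ ms then (running, dep, true) else (running + 1, dd, false))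
    else (running + 1, dep, false)

-- sorted list of the distinct elements of C
def DOf (C : List Int) : List Int := PySem.List.sorted (PySem.Set.ofList C) (fun x => x) false

theorem foldl_stepA_done (ms : Int) (l : List Int) (a b : Int) :
    l.foldl (stepA' ms) (a, b, true) = (a, b, true) := by
  induction l with
  | nil => rfl
  | cons x t ih => simpa [stepA'] using ih

theorem foldl_stepA_replicate (ms : Int) (k : Nat) (r h : Int) :
    (List.replicate k h).foldl (stepA' ms) (r, h, false) = (r + k, h, false) := by
  induction k generalizing r with
  | zero => simp
  | succ n ih =>
    rw [List.replicate_succ, List.foldl_cons]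
    have : stepA' ms (r, h, false) h = (r + 1, h, false) := by simp [stepA']
    rw [this, ih]
    push_cast; ring_nf

theorem getLastD_ne_nil {l : List Int} (hl : l ≠ []) (a b : Int) :
    l.getLastD a = l.getLastD b := by
  cases l with
  | nil => exact absurd rfl hl
  | cons x t => rw [List.getLastD_cons, List.getLastD_cons]

theorem getLastD_append_ne (l1 : List Int) {l2 : List Int} (h : l2 ≠ []) (a : Int) :
    (l1 ++ l2).getLastD a = l2.getLastD a := by
  induction l1 with
  | nil => rfl
  | cons x t ih =>
    cases l2 with
    | nil => exact absurd rfl h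
    | cons y u =>
      rw [List.cons_append, List.getLastD_cons, getLastD_ne_nil (l := t ++ y :: u) (by simp) x a, ih]

theorem getLastD_replicate {k : Nat} (hk : 0 < k) (h a : Int) :
    (List.replicate k h).getLastD a = h := by
  induction k with
  | zero => omega
  | succ n ih =>
    rw [List.replicate_succ, List.getLastD_cons]
    cases n with
    | zero => rfl
    | succ m => rw [getLastD_ne_nil (by simp) h a, ih (by omega)]

theorem getLastD_mem {l : List Int} (hl : l ≠ []) (a : Int) : l.getLastD a ∈ l := by
  induction l generalizing a with
  | nil => exact absurd rfl hl
  | cons x t ih =>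
    rw [List.getLastD_cons]
    cases t with
    | nil => simp
    | cons y u => exact List.mem_cons.2 (Or.inr (ih (by simp) x))

theorem le_getLastD {l : List Int} (hpw : l.Pairwise (fun a b => a ≤ b)) (hl : l ≠ [])
    (a : Int) : ∀ x ∈ l, x ≤ l.getLastD a := by
  induction l generalizing a with
  | nil => exact absurd rfl hl
  | cons y t ih =>
    intro x hx
    rw [List.getLastD_cons]
    rw [List.pairwise_cons] at hpw
    cases t with
    | nil =>
      simp only [List.mem_singleton] at hx
      exact le_of_eq hx
    | cons z u =>
      rcases List.mem_cons.1 hx with rfl | hx'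
      · exact le_trans (hpw.1 _ (getLastD_mem (by simp) x)) le_rfl
      · exact ih hpw.2 (by simp) y x hx'

theorem head_eq_sorted {x y : Int} {t1 t2 : List Int}
    (h1 : (x :: t1).Pairwise (fun a b => a ≤ b)) (h2 : (y :: t2).Pairwise (fun a b => a ≤ b))
    (hm : ∀ z, z ∈ x :: t1 ↔ z ∈ y :: t2) : x = y := by
  have hx : x ∈ y :: t2 := (hm x).1 (by simp)
  have hy : y ∈ x :: t1 := (hm y).2 (by simp)
  rw [List.pairwise_cons] at h1 h2
  have h1' : x ≤ y := by
    rcases List.mem_cons.1 hy with he | hy'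
    · exact le_of_eq he.symm
    · exact h1.1 y hy'
  have h2' : y ≤ x := by
    rcases List.mem_cons.1 hx with he | hx'
    · exact le_of_eq he.symm
    · exact h2.1 x hx'
  omega

theorem last_eq_sorted {l1 l2 : List Int}
    (h1 : l1.Pairwise (fun a b => a ≤ b)) (h2 : l2.Pairwise (fun a b => a ≤ b))
    (hm : ∀ z, z ∈ l1 ↔ z ∈ l2) (hne : l1 ≠ []) : l1.getLastD 0 = l2.getLastD 0 := by
  have hne2 : l2 ≠ [] := by
    cases l1 with
    | nil => exact absurd rfl hne
    | cons x t =>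
      intro h; rw [h] at hm
      exact absurd ((hm x).1 (by simp)) (by simp)
  have hml1 : l1.getLastD 0 ∈ l2 := (hm _).1 (getLastD_mem hne 0)
  have hml2 : l2.getLastD 0 ∈ l1 := (hm _).2 (getLastD_mem hne2 0)
  have a1 : l1.getLastD 0 ≤ l2.getLastD 0 := le_getLastD h2 hne2 0 _ hml1
  have a2 : l2.getLastD 0 ≤ l1.getLastD 0 := le_getLastD h1 hne 0 _ hml2
  omega

theorem mem_DOf (C : List Int) (x : Int) : x ∈ DOf C ↔ x ∈ C := by
  unfold DOf
  rw [PySem.List.mem_sorted, PySem.Set.mem_ofList]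

theorem DOf_nil_iff (C : List Int) : DOf C = [] ↔ C = [] := by
  constructor
  · intro h
    cases C with
    | nil => rfl
    | cons x t =>
      have := (mem_DOf (x :: t) x).2 (by simp)
      rw [h] at this; simp at this
  · intro h; subst h; rfl

theorem DOf_pairwise_le (C : List Int) : (DOf C).Pairwise (fun a b => a ≤ b) :=
  (PySem.List.sorted_ofList_pairwise_lt C).imp (fun h => le_of_lt h)

-- group decomposition of a sorted (nondecreasing) list at its head
theorem sorted_group (C : List Int) (h : Int) (t : List Int) (hC : C = h :: t)
    (hpw : C.Pairwise (fun a b => a ≤ b)) :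
    C = List.replicate (C.takeWhile (fun x => x == h)).length h ++ C.dropWhile (fun x => x == h) ∧
    (∀ x ∈ C.dropWhile (fun x => x == h), h < x) ∧
    (C.dropWhile (fun x => x == h)).Pairwise (fun a b => a ≤ b) ∧
    0 < (C.takeWhile (fun x => x == h)).length := by
  have htake : C.takeWhile (fun x => x == h) = List.replicate (C.takeWhile (fun x => x == h)).length h := by
    rw [List.eq_replicate_iff]
    refine ⟨rfl, fun b hb => ?_⟩
    have := List.mem_takeWhile_imp hb
    simpa using this
  have hsplit : C = List.replicate (C.takeWhile (fun x => x == h)).length h ++ C.dropWhile (fun x => x == h) := by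
    conv_lhs => rw [← List.takeWhile_append_dropWhile (p := fun x => x == h) (l := C)]
    rw [← htake]
  have hge : ∀ x ∈ C, h ≤ x := by
    intro x hx
    rw [hC] at hx hpw
    rcases List.mem_cons.1 hx with rfl | hx
    · exact le_refl x
    · exact (List.pairwise_cons.1 hpw).1 x hx
  have hgt : ∀ x ∈ C.dropWhile (fun x => x == h), h < x := by
    have aux : ∀ (l : List Int), l.Pairwise (fun a b => a ≤ b) → (∀ y ∈ l, h ≤ y) →
        ∀ x ∈ l.dropWhile (fun x => x == h), h < x := by
      intro l
      induction l with
      | nil => intro _ _ x hx; simp at hx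
      | cons y ys ih =>
        intro hpw' hge' x hx
        by_cases hy : y = h
        · subst hy
          rw [List.dropWhile_cons_of_pos (by simp)] at hx
          exact ih (List.pairwise_cons.1 hpw').2 (fun z hz => hge' z (by simp [hz])) x hx
        · rw [List.dropWhile_cons_of_neg (by simpa using hy)] at hx
          have hyh : h < y := lt_of_le_of_ne (hge' y (by simp)) (Ne.symm hy)
          rcases List.mem_cons.1 hx with rfl | hx'
          · exact hyh
          · exact lt_of_lt_of_le hyh ((List.pairwise_cons.1 hpw').1 x hx')
    exact aux C hpw hge
  have hpw' : (C.dropWhile (fun x => x == h)).Pairwise (fun a b => a ≤ b) :=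
    hpw.sublist (List.dropWhile_sublist _)
  have hpos : 0 < (C.takeWhile (fun x => x == h)).length := by
    rw [hC, List.takeWhile_cons_of_pos (by simp)]
    simp
  exact ⟨hsplit, hgt, hpw', hpos⟩

-- the heart: A's advance-and-break scan over the sorted multiset C computes the
-- order statistic C[ms - r - 1] (clamped to head/last) that B reads off directly
theorem loopA_orderstat (ms : Int) :
    ∀ (n : Nat) (C : List Int), C.length ≤ n → C.Pairwise (fun a b => a ≤ b) → C ≠ [] → ∀ (r : Int),
    (if (C.foldl (stepA' ms) (r, C.headD 0, false)).1 < ms then C.getLastD 0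
     else (C.foldl (stepA' ms) (r, C.headD 0, false)).2.1)
    = if ms ≤ r then C.headD 0
      else if (C.length : Int) < ms - r then C.getLastD 0
      else (PySem.List.pyGet? C (ms - r - 1)).getD 0 := by
  intro n
  induction n with
  | zero =>
    intro C hlen _ hne _
    cases C with
    | nil => exact absurd rfl hne
    | cons x t => simp at hlen
  | succ n ih =>
    intro C hlen hpw hne r
    obtain ⟨h, t, hC⟩ : ∃ h t, C = h :: t := by
      cases C with
      | nil => exact absurd rfl hne
      | cons x t => exact ⟨x, t, rfl⟩
    obtain ⟨hsplit, hgt, hpw', hpos⟩ := sorted_group C h t hC hpw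
    set k := (C.takeWhile (fun x => x == h)).length with hk
    set C' := C.dropWhile (fun x => x == h) with hC'def
    have hhead : C.headD 0 = h := by rw [hC]; rfl
    have hfoldC : C.foldl (stepA' ms) (r, C.headD 0, false) = C'.foldl (stepA' ms) (r + k, h, false) := by
      rw [hhead]
      conv_lhs => rw [hsplit]
      rw [List.foldl_append, foldl_stepA_replicate]
    have hlenC : C.length = k + C'.length := by
      conv_lhs => rw [hsplit]; simp [hk]
    by_cases hC'nil : C' = []
    · -- C is a single group: A keeps h, and every branch of the closed form is h
      rw [hC'nil] at hfoldC hlenC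
      simp only [List.foldl_nil] at hfoldC
      have hlast : C.getLastD 0 = h := by
        conv_lhs => rw [hsplit, hC'nil, List.append_nil]
        exact getLastD_replicate hpos h 0
      have hCrep : C = List.replicate k h := by rw [hsplit, hC'nil, List.append_nil]
      have hget : ∀ i : Int, 0 ≤ i → i < (k : Int) → (PySem.List.pyGet? C i).getD 0 = h := by
        intro i h0 hik
        rw [hCrep, PySem.List.pyGet?_of_nonneg _ h0, List.getElem?_replicate,
          if_pos (by omega)]
        rfl
      simp only [List.length_nil, Nat.add_zero] at hlenC
      rw [hfoldC, hhead, hlast]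
      by_cases g1 : ms ≤ r
      · rw [if_pos g1]; split_ifs <;> rfl
      · rw [if_neg g1]
        by_cases g2 : (C.length : Int) < ms - r
        · rw [if_pos g2]; split_ifs <;> rfl
        · rw [if_neg g2, hget (ms - r - 1) (by omega) (by omega)]
          split_ifs <;> rfl
    · obtain ⟨h', t', hC'⟩ : ∃ h' t', C' = h' :: t' := by
        cases hcc : C' with
        | nil => exact absurd hcc hC'nil
        | cons x u => exact ⟨x, u, rfl⟩
      have hh' : h < h' := hgt h' (by rw [hC']; simp)
      have hlastC : C.getLastD 0 = C'.getLastD 0 := by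
        conv_lhs => rw [hsplit]
        rw [getLastD_append_ne _ hC'nil]
      by_cases hms : r + (k : Int) ≥ ms
      · -- A breaks at once, keeping h; the index ms-r-1 falls inside the h-block
        have hstep : stepA' ms (r + (k : Int), h, false) h' = (r + (k : Int), h, true) := by
          simp [stepA', hh', hms]
        rw [hfoldC, hC', List.foldl_cons, hstep, foldl_stepA_done]
        have hnotlt : ¬ ((r + (k : Int), h, true) : Int × Int × Bool).1 < ms := by
          show ¬ ((r + (k : Int)) < ms); omega
        rw [if_neg hnotlt, hhead]
        by_cases g1 : ms ≤ r
        · rw [if_pos g1]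
        · rw [if_neg g1, if_neg (by push_cast [hlenC]; omega)]
          have h0 : (0 : Int) ≤ ms - r - 1 := by omega
          rw [PySem.List.pyGet?_of_nonneg C h0]
          have hik : (ms - r - 1).toNat < k := by omega
          conv_rhs => rw [hsplit]
          rw [List.getElem?_append_left (by simpa using hik), List.getElem?_replicate,
            if_pos hik]
          rfl
      · -- A enters the next group with running = r + k; recurse on C'
        have hA2 : C'.foldl (stepA' ms) (r + (k : Int), h, false)
            = C'.foldl (stepA' ms) (r + (k : Int), C'.headD 0, false) := by
          rw [hC']
          simp only [List.foldl_cons, List.headD_cons]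
          have e1 : stepA' ms (r + (k : Int), h, false) h' = (r + (k : Int) + 1, h', false) := by
            simp [stepA', hh']
            omega
          have e2 : stepA' ms (r + (k : Int), h', false) h' = (r + (k : Int) + 1, h', false) := by
            simp [stepA']
          rw [e1, e2]
        have hlen' : C'.length ≤ n := by omega
        rw [hfoldC, hA2, hlastC]
        rw [ih C' hlen' hpw' (by rw [hC']; simp) (r + (k : Int))]
        have hnk : ¬ ms ≤ r + (k : Int) := by omega
        have hnr : ¬ ms ≤ r := by omega
        rw [if_neg hnk, if_neg hnr]
        by_cases h2 : (C'.length : Int) < ms - (r + (k : Int))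
        · rw [if_pos h2, if_pos (by push_cast [hlenC]; omega)]
        · rw [if_neg h2, if_neg (by push_cast [hlenC]; omega)]
          have h0' : (0 : Int) ≤ ms - (r + (k : Int)) - 1 := by omega
          have h0 : (0 : Int) ≤ ms - r - 1 := by omega
          rw [PySem.List.pyGet?_of_nonneg C' h0', PySem.List.pyGet?_of_nonneg C h0]
          conv_rhs => rw [hsplit]
          rw [List.getElem?_append_right (by simp; omega)]
          congr 2
          simp
          omega

-- A's explicit-depth branch over the sorted distinct depths equals B's over the
-- sorted multiset: membership, first-above and maximum agree
theorem depth_branch (C : List Int) (hpw : C.Pairwise (fun a b => a ≤ b)) (hne : C ≠ [])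
    (dep0 : Int) :
    (if dep0 ∈ DOf C then dep0
     else match (DOf C).filter (fun dd => dd > dep0) with
          | h :: _ => h
          | [] => (DOf C).getLastD 0)
    = (if dep0 ∈ C then dep0
       else match C.filter (fun dd => dd > dep0) with
            | h :: _ => h
            | [] => C.getLastD 0) := by
  have hmemD : ∀ x : Int, x ∈ DOf C ↔ x ∈ C := mem_DOf C
  by_cases hmem : dep0 ∈ C
  · rw [if_pos ((hmemD dep0).2 hmem), if_pos hmem]
  · rw [if_neg (fun hh => hmem ((hmemD dep0).1 hh)), if_neg hmem]
    have hfm : ∀ x : Int, x ∈ (DOf C).filter (fun dd => dd > dep0) ↔ x ∈ C.filter (fun dd => dd > dep0) := by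
      intro x
      rw [List.mem_filter, List.mem_filter, hmemD]
    have hpwD : (DOf C).Pairwise (fun a b => a ≤ b) := DOf_pairwise_le C
    have hpwDf : ((DOf C).filter (fun dd => dd > dep0)).Pairwise (fun a b => a ≤ b) :=
      hpwD.sublist List.filter_sublist
    have hpwCf : (C.filter (fun dd => dd > dep0)).Pairwise (fun a b => a ≤ b) :=
      hpw.sublist List.filter_sublist
    cases hd : (DOf C).filter (fun dd => dd > dep0) with
    | nil =>
      cases hc : C.filter (fun dd => dd > dep0) with
      | nil =>
        exact last_eq_sorted hpwD hpw hmemD (by rw [Ne, DOf_nil_iff]; exact hne)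
      | cons y u =>
        have : y ∈ ([] : List Int) := by
          rw [← hd]; exact (hfm y).2 (by rw [hc]; simp)
        simp at this
    | cons x v =>
      cases hc : C.filter (fun dd => dd > dep0) with
      | nil =>
        have : x ∈ ([] : List Int) := by
          rw [← hc]; exact (hfm x).1 (by rw [hd]; simp)
        simp at this
      | cons y u =>
        rw [hd, hc] at hfm
        exact head_eq_sorted (hd ▸ hpwDf) (hc ▸ hpwCf) hfm

theorem insertBy_pairwise (key : (Int × String) → Int) (before : (Int × String) → (Int × String) → Bool)
    (h1 : ∀ a b, before a b = true → key a ≤ key b)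
    (h2 : ∀ a b, before a b = false → key b ≤ key a) :
    ∀ (l : List (Int × String)) (x : Int × String), l.Pairwise (fun a b => key a ≤ key b) →
      (PySem.List.insertBy before x l).Pairwise (fun a b => key a ≤ key b) := by
  intro l
  induction l with
  | nil => intro x _; simp [PySem.List.insertBy]
  | cons y ys ih =>
    intro x hpw
    rw [List.pairwise_cons] at hpw
    by_cases hb : before x y = true
    · rw [show PySem.List.insertBy before x (y :: ys) = x :: y :: ys by simp [PySem.List.insertBy, hb]]
      refine List.pairwise_cons.2 ⟨?_, List.pairwise_cons.2 hpw⟩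
      intro z hz
      rcases List.mem_cons.1 hz with rfl | hz'
      · exact h1 _ _ hb
      · exact le_trans (h1 _ _ hb) (hpw.1 z hz')
    · rw [show PySem.List.insertBy before x (y :: ys) = y :: PySem.List.insertBy before x ys by
        simp [PySem.List.insertBy, hb]]
      refine List.pairwise_cons.2 ⟨?_, ih x hpw.2⟩
      intro z hz
      rcases (PySem.List.mem_insertBy before x z ys).1 hz with rfl | hz'
      · exact h2 _ _ (by simpa using hb)
      · exact hpw.1 z hz'

theorem sorted2_fst_pairwise (P : List (Int × String)) :
    ((PySem.List.sorted2 P (fun p => p.1) (fun p => p.2) false).map Prod.fst).Pairwise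
      (fun a b => a ≤ b) := by
  rw [List.pairwise_map]
  have hfold : ∀ (xs : List (Int × String)) (acc : List (Int × String)),
      acc.Pairwise (fun a b => a.1 ≤ b.1) →
      (xs.foldl (fun acc x => PySem.List.insertBy
        (fun a b => decide (a.1 < b.1) || (!decide (b.1 < a.1) && decide (a.2 < b.2))) x acc) acc).Pairwise
        (fun a b => a.1 ≤ b.1) := by
    intro xs
    induction xs with
    | nil => intro acc h; exact h
    | cons x xs ih =>
      intro acc h
      rw [List.foldl_cons]
      refine ih _ (insertBy_pairwise (fun p => p.1) _ ?_ ?_ acc x h)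
      · intro a b hab
        simp only [Bool.or_eq_true, Bool.and_eq_true, decide_eq_true_eq, Bool.not_eq_true',
          decide_eq_false_iff_not] at hab
        rcases hab with hlt | ⟨hnlt, _⟩
        · exact le_of_lt hlt
        · exact le_of_not_gt hnlt
      · intro a b hab
        simp only [Bool.or_eq_false_iff, Bool.and_eq_false_iff, decide_eq_false_iff_not] at hab
        exact le_of_not_gt hab.1
  have : PySem.List.sorted2 P (fun p => p.1) (fun p => p.2) false
      = P.foldl (fun acc x => PySem.List.insertBy
        (fun a b => decide (a.1 < b.1) || (!decide (b.1 < a.1) && decide (a.2 < b.2))) x acc) [] := rfl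
  rw [this]
  exact hfold P [] (by simp)

theorem getLastD_fst : ∀ (l : List (Int × String)) (a x : Int × String) (b : Int),
    ((a :: l).getLastD x).1 = ((a :: l).map Prod.fst).getLastD b := by
  intro l
  induction l with
  | nil => intro a x b; rfl
  | cons y u ih =>
    intro a x b
    rw [List.getLastD_cons (b := a) (l := y :: u) (a := x), List.map_cons,
      List.getLastD_cons (b := a.1) (l := (y :: u).map Prod.fst) (a := b)]
    exact ih y a a.1

theorem main_eq (state_vars : List String) (dist : List (String × Int)) (depth : Option Int) (max_state : Option Int) :
    choose_a1 state_vars dist depth max_state = choose_a1_alt state_vars dist depth max_state := by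
  simp only [choose_a1, choose_a1_alt]
  set d := PySem.Dict.mk dist with hd
  set P := state_vars.filterMap (fun v => (d.get? v).map (fun dv => (dv, v))) with hP
  set L := state_vars.filterMap (fun v => d.get? v) with hL
  have hPL : P.map Prod.fst = L := by
    rw [hP, hL, List.map_filterMap]
    congr 1
    funext v
    cases d.get? v <;> rfl
  cases hc : PySem.List.sorted2 P (fun p => p.1) (fun p => p.2) false with
  | nil =>
    have hPnil : P = [] := by
      have := PySem.List.sorted2_perm P (fun p => p.1) (fun p => p.2) false
      rw [hc] at this
      exact this.nil_eq.symm
    have hLnil : L = [] := by rw [← hPL, hPnil]; rfl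
    rw [hLnil]
    rfl
  | cons c0 crest =>
    have hcpermP : (c0 :: crest).Perm P := by
      have := PySem.List.sorted2_perm P (fun p => p.1) (fun p => p.2) false
      rwa [hc] at this
    have hCpw : ((c0 :: crest).map (fun p => p.1)).Pairwise (fun a b => a ≤ b) := by
      have := sorted2_fst_pairwise P
      rwa [hc] at this
    set C := (c0 :: crest).map (fun p => p.1) with hC
    have hCL : C.Perm L := by
      rw [← hPL, hC]
      exact (hcpermP.map (fun p => p.1)).trans (by rfl)
    have hvals : PySem.List.sorted L (fun x => x) false = C :=
      PySem.List.sorted_id_eq_of_perm_of_pairwise L C hCL hCpw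
    rw [hvals]
    have hCcons : C = c0.1 :: crest.map (fun p => p.1) := by rw [hC]; rfl
    rw [hCcons]
    have hdep : aDep c0 crest depth max_state
        = bDep c0.1 (crest.map (fun p => p.1)) depth max_state := by
      unfold aDep bDep
      cases depth with
      | some dep0 =>
        dsimp only
        have := depth_branch C hCpw (by rw [hC]; simp) dep0
        rw [hCcons] at this
        exact this
      | none =>
        cases max_state with
        | none => rfl
        | some ms =>
          dsimp only
          have hfoldpair : ∀ (init : Int × Int × Bool),
              (c0 :: crest).foldl (stepA ms) init = C.foldl (stepA' ms) init := by
            intro init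
            rw [hC, List.foldl_map]
            rfl
          have hhead : C.headD 0 = c0.1 := by rw [hC]; rfl
          have hlast : ((c0 :: crest).getLastD c0).1 = C.getLastD 0 := by
            rw [hC]; exact getLastD_fst crest c0 c0 0
          have horder := loopA_orderstat ms C.length C le_rfl hCpw (by rw [hC]; simp) 0
          rw [hfoldpair (0, c0.1, false), hlast]
          conv_lhs => rw [← hhead]
          rw [horder, ← hCcons, hhead]
          simp only [sub_zero]
    dsimp only
    rw [hdep]

-- ===== VERDICT (by name: the statement is the Claim_ definition above) =====
theorem choose_a1_spec : Claim_equal_choose_a1 := by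
  intro state_vars dist depth max_state _
  unfold Spec_choose_a1
  exact main_eq state_vars dist depth max_state
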